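-- pv_equiv track=rewrite | github.com/2778995958/gal_tachie_ai | cs2_hg3/hg3立繪.py | find_all_combinations_recursive
-- ===== SOURCE A (Python) =====
-- def find_all_combinations_recursive(section_key, base_prefix, current_layers, current_filename_parts, cl_data):
--     """
--     遞迴函式，同時產生用於合成的圖層列表和用於命名的部件列表。
--     """
--     if section_key not in cl_data or not cl_data[section_key]:
--         yield list(current_layers), list(current_filename_parts)
--         return
--
--     for line in cl_data[section_key]:
--         last_space_index = line.rfind(' ')
--         rule_string, next_section_key = line, None
--         if last_space_index != -1:
--             rule_string, next_section_key = line[:last_space_index], line[last_space_index + 1:]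
--
--         parts = [p.strip() for p in rule_string.split(',')]
--         new_layers = list(current_layers)
--         new_filename_parts = list(current_filename_parts)
--
--         for i, part in enumerate(parts):
--             if part == '@':
--                 continue # @不作任何紀錄
--
--             # 為圖層列表添加新圖層 (用於合成)
--             # 無論是數字還是字母，都使用相同的補零規則
--             layer_suffix = "_0" if part == '0' else f"_{'0'*(i-1)}{part}"
--             new_layers.append(f"{base_prefix}{layer_suffix}")
--
--             # --- 核心修改：統一檔名部件的生成規則 ---
--             # 為檔名列表添加新部件 (用於命名)
--             filename_suffix = ""
--             if part == '0':
--                 filename_suffix = "_0"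
--             else: # 對所有其他部件 (包括字母和數字)，都使用補零規則
--                 filename_suffix = f"_{'0'*(i-1)}{part}"
--
--             new_filename_parts.append(filename_suffix)
--
--         yield from find_all_combinations_recursive(next_section_key, base_prefix, new_layers, new_filename_parts, cl_data)
-- ===== SOURCE B (Python) =====
-- # B: compositional decomposition — compute the suffix-part combinations per section
-- # bottom-up, then prefix layers/filename parts once at the top (A threads accumulators down).
--
-- def _split_rule(line):
--     idx = line.rfind(' ')
--     if idx == -1:
--         return line, None
--     return line[:idx], line[idx + 1:]
--
--
-- def _line_suffixes(rule_string):
--     sufs = []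
--     for i, p in enumerate(rule_string.split(',')):
--         part = p.strip()
--         if part != '@':
--             sufs.append("_0" if part == '0' else "_" + "0" * (i - 1) + part)
--     return sufs
--
--
-- def _suffix_combos(key, cl_data):
--     lines = cl_data.get(key)
--     if not lines:
--         yield []
--         return
--     for line in lines:
--         rule, nxt = _split_rule(line)
--         head = _line_suffixes(rule)
--         for tail in _suffix_combos(nxt, cl_data):
--             yield head + tail
--
--
-- def find_all_combinations_recursive(section_key, base_prefix, current_layers, current_filename_parts, cl_data):
--     for sufs in _suffix_combos(section_key, cl_data):
--         yield current_layers + [base_prefix + s for s in sufs], current_filename_parts + sufs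
-- ===== Notes on version B (the rewrite author's own statement) =====
-- stated objective: alternative
-- what changed: A threads the growing layer/filename accumulator lists down through the recursion; B computes the suffix-part combination lists per section bottom-up from the referenced sections and prefixes the caller's layers/filename parts once at the top.
import Mathlib
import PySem

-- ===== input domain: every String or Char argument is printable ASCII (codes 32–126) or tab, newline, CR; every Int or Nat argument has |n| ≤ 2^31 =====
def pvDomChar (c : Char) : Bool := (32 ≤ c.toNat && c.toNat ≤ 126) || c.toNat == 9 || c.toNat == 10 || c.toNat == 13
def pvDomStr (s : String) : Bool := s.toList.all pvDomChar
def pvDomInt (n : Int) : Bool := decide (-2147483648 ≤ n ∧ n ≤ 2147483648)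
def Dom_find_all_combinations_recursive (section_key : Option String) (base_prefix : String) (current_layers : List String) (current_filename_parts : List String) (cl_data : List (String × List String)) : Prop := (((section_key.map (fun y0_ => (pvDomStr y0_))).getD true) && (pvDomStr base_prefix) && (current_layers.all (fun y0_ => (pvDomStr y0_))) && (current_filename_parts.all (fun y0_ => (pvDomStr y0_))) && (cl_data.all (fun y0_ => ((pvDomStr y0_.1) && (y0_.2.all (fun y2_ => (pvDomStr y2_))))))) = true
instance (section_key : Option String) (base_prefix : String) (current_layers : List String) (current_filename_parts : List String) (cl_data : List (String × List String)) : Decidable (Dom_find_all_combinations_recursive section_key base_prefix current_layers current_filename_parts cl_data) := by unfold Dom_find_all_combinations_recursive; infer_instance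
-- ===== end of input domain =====

-- B replaces A's downward threading of the two accumulator lists by a bottom-up computation of
-- the per-section suffix combinations, prefixing the accumulators once at the top (objective:
-- alternative decomposition, same cost). Both ports are made total with the same fuel
-- cl_data.length + 1, which is enough whenever A's Python recursion terminates (Pre_ below).

-- ===== PORT A =====
-- inner 'for i, part in enumerate(parts)' loop of A, threading the two accumulator lists
def pvPartsLoopA (base_prefix : String) : Nat → List String → List String → List String → List String × List String
  | _, [], new_layers, new_filename_parts => (new_layers, new_filename_parts)
  | i, part :: rest, new_layers, new_filename_parts =>
    if part = "@" then pvPartsLoopA base_prefix (i + 1) rest new_layers new_filename_parts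
    else
      let layer_suffix := if part = "0" then "_0" else "_" ++ String.ofList (List.replicate (i - 1) '0') ++ part
      let filename_suffix := if part = "0" then "_0" else "_" ++ String.ofList (List.replicate (i - 1) '0') ++ part
      pvPartsLoopA base_prefix (i + 1) rest (new_layers ++ [base_prefix ++ layer_suffix]) (new_filename_parts ++ [filename_suffix])

-- A's recursion, fueled (fuel only makes the function total; cl_data.length + 1 suffices on Pre_)
def pvFacA : Nat → Option String → String → List String → List String → List (String × List String) → List (List String × List String)
  | 0, _, _, _, _, _ => []
  | fuel + 1, section_key, base_prefix, current_layers, current_filename_parts, cl_data =>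
    match section_key.bind (fun s => (cl_data.find? (fun p => p.1 = s)).map Prod.snd) with
    | none => [(current_layers, current_filename_parts)]
    | some [] => [(current_layers, current_filename_parts)]
    | some lines =>
      lines.flatMap (fun line =>
        let last_space_index := PySem.Str.rfind line " "
        let pr : String × Option String :=
          if last_space_index ≠ -1 then
            (PySem.Str.slice line none (some last_space_index),
             some (PySem.Str.slice line (some (last_space_index + 1)) none))
          else (line, none)
        let parts := ((PySem.Str.split? pr.1 ",").getD []).map PySem.Str.strip
        let st := pvPartsLoopA base_prefix 0 parts current_layers current_filename_parts
        pvFacA fuel pr.2 base_prefix st.1 st.2 cl_data)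

def find_all_combinations_recursive (section_key : Option String) (base_prefix : String) (current_layers : List String) (current_filename_parts : List String) (cl_data : List (String × List String)) : List (List String × List String) :=
  pvFacA (cl_data.length + 1) section_key base_prefix current_layers current_filename_parts cl_data

-- ===== PORT B =====
-- Source B's _split_rule
def pvSplitRule (line : String) : String × Option String :=
  let idx := PySem.Str.rfind line " "
  if idx = -1 then (line, none)
  else (PySem.Str.slice line none (some idx), some (PySem.Str.slice line (some (idx + 1)) none))

-- Source B's _line_suffixes loop (index-threading recursion over the split pieces)
def pvLineSuffixes : Nat → List String → List String
  | _, [] => []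
  | i, p :: rest =>
    let part := PySem.Str.strip p
    if part ≠ "@" then
      (if part = "0" then "_0" else "_" ++ String.ofList (List.replicate (i - 1) '0') ++ part) :: pvLineSuffixes (i + 1) rest
    else pvLineSuffixes (i + 1) rest

-- Source B's _suffix_combos, fueled like A
def pvCombos : Nat → Option String → List (String × List String) → List (List String)
  | 0, _, _ => []
  | fuel + 1, key, cl_data =>
    match key.bind (fun s => (cl_data.find? (fun p => p.1 = s)).map Prod.snd) with
    | none => [[]]
    | some [] => [[]]
    | some lines =>
      lines.flatMap (fun line =>
        let rn := pvSplitRule line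
        let head := pvLineSuffixes 0 ((PySem.Str.split? rn.1 ",").getD [])
        (pvCombos fuel rn.2 cl_data).map (fun tail => head ++ tail))

def find_all_combinations_recursive_alt (section_key : Option String) (base_prefix : String) (current_layers : List String) (current_filename_parts : List String) (cl_data : List (String × List String)) : List (List String × List String) :=
  (pvCombos (cl_data.length + 1) section_key cl_data).map
    (fun sufs => (current_layers ++ sufs.map (fun s => base_prefix ++ s), current_filename_parts ++ sufs))

-- ===== PRECONDITION & SPEC =====
-- the next-section key a line points at (as A/B parse it)
def pvNextKeyOf (line : String) : Option String :=
  let idx := PySem.Str.rfind line " "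
  if idx = -1 then none else some (PySem.Str.slice line (some (idx + 1)) none)

-- the section keys directly referenced from key k
def pvSuccKeys (cl_data : List (String × List String)) (k : String) : List String :=
  match (cl_data.find? (fun p => p.1 = k)).map Prod.snd with
  | none => []
  | some lines => lines.filterMap pvNextKeyOf

def pvReachStep (cl_data : List (String × List String)) (S : List String) : List String :=
  (S ++ S.flatMap (pvSuccKeys cl_data)).dedup

def pvReachN (cl_data : List (String × List String)) : Nat → List String → List String
  | 0, S => S
  | n + 1, S => pvReachN cl_data n (pvReachStep cl_data S)

-- Pre_ excludes exactly the inputs where a cycle of section references is reachable from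
-- section_key: there A's Python recursion never terminates (RecursionError).
def Pre_find_all_combinations_recursive (section_key : Option String) (base_prefix : String) (current_layers : List String) (current_filename_parts : List String) (cl_data : List (String × List String)) : Prop :=
  ∀ k ∈ pvReachN cl_data (cl_data.length + 1) section_key.toList,
    k ∉ pvReachN cl_data (cl_data.length + 1) (pvSuccKeys cl_data k)
instance (section_key : Option String) (base_prefix : String) (current_layers : List String) (current_filename_parts : List String) (cl_data : List (String × List String)) : Decidable (Pre_find_all_combinations_recursive section_key base_prefix current_layers current_filename_parts cl_data) := by unfold Pre_find_all_combinations_recursive; infer_instance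

def pvWitness_find_all_combinations_recursive : Option String × String × List String × List String × (List (String × List String)) :=
  (some "a", "p", ["l0"], ["_f"], [("a", ["1,2 b", "@"]), ("b", ["0"])])

def Spec_find_all_combinations_recursive (section_key : Option String) (base_prefix : String) (current_layers : List String) (current_filename_parts : List String) (cl_data : List (String × List String)) (out : List (List String × List String)) : Prop := out = find_all_combinations_recursive_alt section_key base_prefix current_layers current_filename_parts cl_data
instance (section_key : Option String) (base_prefix : String) (current_layers : List String) (current_filename_parts : List String) (cl_data : List (String × List String)) (out : List (List String × List String)) : Decidable (Spec_find_all_combinations_recursive section_key base_prefix current_layers current_filename_parts cl_data out) := by unfold Spec_find_all_combinations_recursive; infer_instance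

-- ===== CLAIM (what is proved, stated in full; the proofs are below) =====
def Claim_equal_find_all_combinations_recursive : Prop := ∀ (section_key : Option String) (base_prefix : String) (current_layers : List String) (current_filename_parts : List String) (cl_data : List (String × List String)), Dom_find_all_combinations_recursive section_key base_prefix current_layers current_filename_parts cl_data → Pre_find_all_combinations_recursive section_key base_prefix current_layers current_filename_parts cl_data → Spec_find_all_combinations_recursive section_key base_prefix current_layers current_filename_parts cl_data (find_all_combinations_recursive section_key base_prefix current_layers current_filename_parts cl_data)

-- ===== LEMMAS AND PROOFS =====

-- A's accumulator loop is: append the (mapped) suffix list B computes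
theorem pvPartsLoopA_eq (base_prefix : String) (ps : List String) :
    ∀ (i : Nat) (L F : List String),
      pvPartsLoopA base_prefix i (ps.map PySem.Str.strip) L F
        = (L ++ (pvLineSuffixes i ps).map (fun s => base_prefix ++ s), F ++ pvLineSuffixes i ps) := by
  induction ps with
  | nil => intro i L F; simp [pvPartsLoopA, pvLineSuffixes]
  | cons p rest ih =>
    intro i L F
    by_cases h : PySem.Str.strip p = "@"
    · simp [pvPartsLoopA, pvLineSuffixes, h, ih]
    · simp [pvPartsLoopA, pvLineSuffixes, h, ih, List.append_assoc]

theorem pvFacA_eq_combos (fuel : Nat) :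
    ∀ (section_key : Option String) (base_prefix : String) (L F : List String)
      (cl_data : List (String × List String)),
      pvFacA fuel section_key base_prefix L F cl_data
        = (pvCombos fuel section_key cl_data).map
            (fun sufs => (L ++ sufs.map (fun s => base_prefix ++ s), F ++ sufs)) := by
  induction fuel with
  | zero => intro sk bp L F cl; simp [pvFacA, pvCombos]
  | succ fuel ih =>
    intro sk bp L F cl
    rw [pvFacA, pvCombos]
    cases h : sk.bind (fun s => (cl.find? (fun p => p.1 = s)).map Prod.snd) with
    | none => simp
    | some lines =>
      cases lines with
      | nil => simp
      | cons line rest =>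
        simp only [List.map_flatMap]
        apply List.flatMap_congr
        intro l _
        have hsplit : (if PySem.Str.rfind l " " ≠ -1 then
            (PySem.Str.slice l none (some (PySem.Str.rfind l " ")),
             some (PySem.Str.slice l (some (PySem.Str.rfind l " " + 1)) none))
          else (l, none)) = pvSplitRule l := by
          unfold pvSplitRule
          by_cases hc : PySem.Str.rfind l " " = -1
          · simp
          · simp
        simp only [hsplit]
        rw [pvPartsLoopA_eq, ih]
        simp [List.map_map, Function.comp, List.map_append, List.append_assoc]

-- ===== VERDICT (by name: the statement is the Claim_ definition above) =====
theorem find_all_combinations_recursive_spec : Claim_equal_find_all_combinations_recursive := by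
  intro sk bp L F cl _ _
  unfold Spec_find_all_combinations_recursive find_all_combinations_recursive find_all_combinations_recursive_alt
  exact pvFacA_eq_combos _ sk bp L F cl
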